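-- pv_equiv track=rewrite | github.com/itcharge/LeetCode-Py | Templates/10.Dynamic-Programming/Pack-GroupPack.py | groupPackMethod1
-- ===== SOURCE A (Python) =====
-- def groupPackMethod1(group_count: [int], weight: [[int]], value: [[int]], W: int):
--     size = len(group_count)
--     dp = [[0 for _ in range(W + 1)] for _ in range(size + 1)]
--
--     # 枚举前 i 组物品
--     for i in range(1, size + 1):
--         # 枚举背包装载重量
--         for w in range(W + 1):
--             # 枚举第 i - 1 组物品能取个数
--             dp[i][w] = dp[i - 1][w]
--             for k in range(group_count[i - 1]):
--                 if w >= weight[i - 1][k]: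
--                     # dp[i][w] 取所有 dp[i - 1][w - weight[i - 1][k]] + value[i - 1][k] 中最大值
--                     dp[i][w] = max(dp[i][w], dp[i - 1][w - weight[i - 1][k]] + value[i - 1][k])
--
--     return dp[size][W]
-- ===== SOURCE B (Python) =====
-- def groupPackMethod1(group_count: [int], weight: [[int]], value: [[int]], W: int):
--     size = len(group_count)
--     memo = {}
--
--     def solve(i, w):
--         # best value achievable with the first i groups and capacity w
--         if i == 0:
--             return 0
--         key = (i, w)
--         if key in memo:
--             return memo[key]
--         best = solve(i - 1, w)
--         for k in range(group_count[i - 1]):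
--             wt = weight[i - 1][k]
--             if wt <= w:
--                 cand = solve(i - 1, w - wt) + value[i - 1][k]
--                 if cand > best:
--                     best = cand
--         memo[key] = best
--         return best
--
--     return solve(size, W)
-- ===== Notes on version B (the rewrite author's own statement) =====
-- stated objective: alternative
-- what changed: Replaces A's bottom-up 2D DP table (triple nested loop filling dp[i][w] for every i and w) with top-down memoized recursion solve(i, w) cached in a dict, computing only the states reachable from (size, W).
import Mathlib
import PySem

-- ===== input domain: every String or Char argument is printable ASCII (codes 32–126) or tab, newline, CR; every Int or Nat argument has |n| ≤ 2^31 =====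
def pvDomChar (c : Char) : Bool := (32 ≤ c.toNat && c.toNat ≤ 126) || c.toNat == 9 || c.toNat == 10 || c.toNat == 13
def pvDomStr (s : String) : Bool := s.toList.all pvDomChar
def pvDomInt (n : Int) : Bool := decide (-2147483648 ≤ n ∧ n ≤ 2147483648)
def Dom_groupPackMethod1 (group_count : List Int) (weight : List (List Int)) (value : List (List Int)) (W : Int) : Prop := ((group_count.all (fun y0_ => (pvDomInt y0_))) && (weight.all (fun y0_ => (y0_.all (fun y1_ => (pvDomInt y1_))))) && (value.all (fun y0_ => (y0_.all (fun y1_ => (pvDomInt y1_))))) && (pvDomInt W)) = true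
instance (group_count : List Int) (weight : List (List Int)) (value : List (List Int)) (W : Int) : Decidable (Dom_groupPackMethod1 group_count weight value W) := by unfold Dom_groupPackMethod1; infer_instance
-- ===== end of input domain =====

-- B replaces A's bottom-up 2D table with top-down memoized recursion over (groups used, capacity); equal return values, objective: alternative decomposition.

-- ===== PORT A =====
def groupPackMethod1 (group_count : List Int) (weight : List (List Int)) (value : List (List Int)) (W : Int) : Int :=
  let size := group_count.length
  let dp0 : List (List Int) :=
    (PySem.List.pyRange 0 ((size : Int) + 1) 1).map
      (fun _ => (PySem.List.pyRange 0 (W + 1) 1).map (fun _ => (0 : Int)))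
  let dp :=
    (PySem.List.pyRange 1 ((size : Int) + 1) 1).foldl
      (fun dp i =>
        let row :=
          (PySem.List.pyRange 0 (W + 1) 1).foldl
            (fun row w =>
              let cell :=
                (PySem.List.pyRange 0 (PySem.List.pyGetD group_count (i - 1) 0) 1).foldl
                  (fun cur k =>
                    if w ≥ PySem.List.pyGetD (PySem.List.pyGetD weight (i - 1) []) k 0 then
                      max cur
                        (PySem.List.pyGetD (PySem.List.pyGetD dp (i - 1) [])
                            (w - PySem.List.pyGetD (PySem.List.pyGetD weight (i - 1) []) k 0) 0
                          + PySem.List.pyGetD (PySem.List.pyGetD value (i - 1) []) k 0)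
                    else cur)
                  (PySem.List.pyGetD (PySem.List.pyGetD dp (i - 1) []) w 0)
              row ++ [cell])
            []
        PySem.List.pySetD dp i row)
      dp0
  PySem.List.pyGetD (PySem.List.pyGetD dp (size : Int) []) W 0

-- ===== PORT B =====
-- Python B's memo dict is threaded explicitly; recursion is on the number of groups.
def pvSolveB (group_count : List Int) (weight : List (List Int)) (value : List (List Int)) :
    Nat → Int → PySem.Dict (Int × Int) Int → Int × PySem.Dict (Int × Int) Int :=
  fun i => Nat.rec
    (motive := fun _ => Int → PySem.Dict (Int × Int) Int → Int × PySem.Dict (Int × Int) Int)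
    (fun _ memo => (0, memo))
    (fun n f w memo =>
      match PySem.Dict.get? memo ((n : Int) + 1, w) with
      | some v => (v, memo)
      | none =>
        let r :=
          (PySem.List.pyRange 0 (PySem.List.pyGetD group_count (n : Int) 0) 1).foldl
            (fun acc k =>
              if PySem.List.pyGetD (PySem.List.pyGetD weight (n : Int) []) k 0 ≤ w then
                (if (f (w - PySem.List.pyGetD (PySem.List.pyGetD weight (n : Int) []) k 0) acc.2).1
                      + PySem.List.pyGetD (PySem.List.pyGetD value (n : Int) []) k 0 > acc.1 then
                    (f (w - PySem.List.pyGetD (PySem.List.pyGetD weight (n : Int) []) k 0) acc.2).1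
                      + PySem.List.pyGetD (PySem.List.pyGetD value (n : Int) []) k 0
                  else acc.1,
                  (f (w - PySem.List.pyGetD (PySem.List.pyGetD weight (n : Int) []) k 0) acc.2).2)
              else acc)
            (f w memo)
        (r.1, PySem.Dict.insert r.2 ((n : Int) + 1, w) r.1))
    i

def groupPackMethod1_alt (group_count : List Int) (weight : List (List Int)) (value : List (List Int)) (W : Int) : Int :=
  (pvSolveB group_count weight value group_count.length W PySem.Dict.empty).1

-- ===== PRECONDITION & SPEC =====
-- Pre_ = exactly the inputs on which Python A returns: W ≥ 0 (else dp[size][W] is an IndexError),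
-- every counted weight index exists and the weight is nonnegative (a negative weight makes A index
-- past the row end at w = W), and the value index exists whenever that item's weight can pass the
-- guard (weight ≤ W).
def Pre_groupPackMethod1 (group_count : List Int) (weight : List (List Int)) (value : List (List Int)) (W : Int) : Prop :=
  0 ≤ W ∧ ∀ i < group_count.length,
    (group_count.getD i 0 ≤ ((weight.getD i []).length : Int)) ∧
    ∀ k < (group_count.getD i 0).toNat,
      0 ≤ (weight.getD i []).getD k 0 ∧
      ((weight.getD i []).getD k 0 ≤ W → k < (value.getD i []).length)
instance (group_count : List Int) (weight : List (List Int)) (value : List (List Int)) (W : Int) : Decidable (Pre_groupPackMethod1 group_count weight value W) := by unfold Pre_groupPackMethod1; infer_instance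

def pvWitness_groupPackMethod1 : List Int × List (List Int) × List (List Int) × Int :=
  ([1, 2], [[1], [2, 1]], [[3], [5, 2]], 4)

def Spec_groupPackMethod1 (group_count : List Int) (weight : List (List Int)) (value : List (List Int)) (W : Int) (out : Int) : Prop := out = groupPackMethod1_alt group_count weight value W
instance (group_count : List Int) (weight : List (List Int)) (value : List (List Int)) (W : Int) (out : Int) : Decidable (Spec_groupPackMethod1 group_count weight value W out) := by unfold Spec_groupPackMethod1; infer_instance

-- ===== CLAIM (what is proved, stated in full; the proofs are below) =====
def Claim_equal_groupPackMethod1 : Prop := ∀ (group_count : List Int) (weight : List (List Int)) (value : List (List Int)) (W : Int), Dom_groupPackMethod1 group_count weight value W → Pre_groupPackMethod1 group_count weight value W → Spec_groupPackMethod1 group_count weight value W (groupPackMethod1 group_count weight value W)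

-- ===== LEMMAS AND PROOFS =====

-- The pure (memo-free) top-down recurrence; both ports are shown to compute it.
def pvSolveP (group_count : List Int) (weight : List (List Int)) (value : List (List Int)) :
    Nat → Int → Int :=
  fun i => Nat.rec (motive := fun _ => Int → Int)
    (fun _ => 0)
    (fun n f w =>
      (PySem.List.pyRange 0 (PySem.List.pyGetD group_count (n : Int) 0) 1).foldl
        (fun best k =>
          if PySem.List.pyGetD (PySem.List.pyGetD weight (n : Int) []) k 0 ≤ w then
            (if f (w - PySem.List.pyGetD (PySem.List.pyGetD weight (n : Int) []) k 0)
                  + PySem.List.pyGetD (PySem.List.pyGetD value (n : Int) []) k 0 > best then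
                f (w - PySem.List.pyGetD (PySem.List.pyGetD weight (n : Int) []) k 0)
                  + PySem.List.pyGetD (PySem.List.pyGetD value (n : Int) []) k 0
              else best)
          else best)
        (f w))
    i

-- memo invariant: every cached entry is the pure value
def pvGood (gc : List Int) (wt vl : List (List Int)) (m : PySem.Dict (Int × Int) Int) : Prop :=
  ∀ (i : Nat) (w v : Int), PySem.Dict.get? m ((i : Int), w) = some v → v = pvSolveP gc wt vl i w

theorem pvSolveP_succ (gc : List Int) (wt vl : List (List Int)) (n : Nat) (w : Int) :
    pvSolveP gc wt vl (n + 1) w =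
      (PySem.List.pyRange 0 (PySem.List.pyGetD gc (n : Int) 0) 1).foldl
        (fun best k =>
          if PySem.List.pyGetD (PySem.List.pyGetD wt (n : Int) []) k 0 ≤ w then
            (if pvSolveP gc wt vl n (w - PySem.List.pyGetD (PySem.List.pyGetD wt (n : Int) []) k 0)
                  + PySem.List.pyGetD (PySem.List.pyGetD vl (n : Int) []) k 0 > best then
                pvSolveP gc wt vl n (w - PySem.List.pyGetD (PySem.List.pyGetD wt (n : Int) []) k 0)
                  + PySem.List.pyGetD (PySem.List.pyGetD vl (n : Int) []) k 0
              else best)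
          else best)
        (pvSolveP gc wt vl n w) := rfl

theorem pvSolveB_succ (gc : List Int) (wt vl : List (List Int)) (n : Nat) (w : Int)
    (m : PySem.Dict (Int × Int) Int) :
    pvSolveB gc wt vl (n + 1) w m =
      match PySem.Dict.get? m ((n : Int) + 1, w) with
      | some v => (v, m)
      | none =>
        let r :=
          (PySem.List.pyRange 0 (PySem.List.pyGetD gc (n : Int) 0) 1).foldl
            (fun acc k =>
              if PySem.List.pyGetD (PySem.List.pyGetD wt (n : Int) []) k 0 ≤ w then
                (if (pvSolveB gc wt vl n (w - PySem.List.pyGetD (PySem.List.pyGetD wt (n : Int) []) k 0) acc.2).1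
                      + PySem.List.pyGetD (PySem.List.pyGetD vl (n : Int) []) k 0 > acc.1 then
                    (pvSolveB gc wt vl n (w - PySem.List.pyGetD (PySem.List.pyGetD wt (n : Int) []) k 0) acc.2).1
                      + PySem.List.pyGetD (PySem.List.pyGetD vl (n : Int) []) k 0
                  else acc.1,
                  (pvSolveB gc wt vl n (w - PySem.List.pyGetD (PySem.List.pyGetD wt (n : Int) []) k 0) acc.2).2)
              else acc)
            (pvSolveB gc wt vl n w m)
        (r.1, PySem.Dict.insert r.2 ((n : Int) + 1, w) r.1) := rfl

theorem pvSolveB_fold (gc : List Int) (wt vl : List (List Int)) (n : Nat) (w : Int)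
    (ih : ∀ (u : Int) (m : PySem.Dict (Int × Int) Int), pvGood gc wt vl m →
      (pvSolveB gc wt vl n u m).1 = pvSolveP gc wt vl n u ∧
      pvGood gc wt vl (pvSolveB gc wt vl n u m).2) :
    ∀ (ks : List Int) (acc : Int × PySem.Dict (Int × Int) Int), pvGood gc wt vl acc.2 →
      (ks.foldl (fun acc k =>
          if PySem.List.pyGetD (PySem.List.pyGetD wt (n : Int) []) k 0 ≤ w then
            (if (pvSolveB gc wt vl n (w - PySem.List.pyGetD (PySem.List.pyGetD wt (n : Int) []) k 0) acc.2).1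
                  + PySem.List.pyGetD (PySem.List.pyGetD vl (n : Int) []) k 0 > acc.1 then
                (pvSolveB gc wt vl n (w - PySem.List.pyGetD (PySem.List.pyGetD wt (n : Int) []) k 0) acc.2).1
                  + PySem.List.pyGetD (PySem.List.pyGetD vl (n : Int) []) k 0
              else acc.1,
              (pvSolveB gc wt vl n (w - PySem.List.pyGetD (PySem.List.pyGetD wt (n : Int) []) k 0) acc.2).2)
          else acc) acc).1
        = ks.foldl (fun best k =>
          if PySem.List.pyGetD (PySem.List.pyGetD wt (n : Int) []) k 0 ≤ w then
            (if pvSolveP gc wt vl n (w - PySem.List.pyGetD (PySem.List.pyGetD wt (n : Int) []) k 0)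
                  + PySem.List.pyGetD (PySem.List.pyGetD vl (n : Int) []) k 0 > best then
                pvSolveP gc wt vl n (w - PySem.List.pyGetD (PySem.List.pyGetD wt (n : Int) []) k 0)
                  + PySem.List.pyGetD (PySem.List.pyGetD vl (n : Int) []) k 0
              else best)
          else best) acc.1
      ∧ pvGood gc wt vl ((ks.foldl (fun acc k =>
          if PySem.List.pyGetD (PySem.List.pyGetD wt (n : Int) []) k 0 ≤ w then
            (if (pvSolveB gc wt vl n (w - PySem.List.pyGetD (PySem.List.pyGetD wt (n : Int) []) k 0) acc.2).1
                  + PySem.List.pyGetD (PySem.List.pyGetD vl (n : Int) []) k 0 > acc.1 then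
                (pvSolveB gc wt vl n (w - PySem.List.pyGetD (PySem.List.pyGetD wt (n : Int) []) k 0) acc.2).1
                  + PySem.List.pyGetD (PySem.List.pyGetD vl (n : Int) []) k 0
              else acc.1,
              (pvSolveB gc wt vl n (w - PySem.List.pyGetD (PySem.List.pyGetD wt (n : Int) []) k 0) acc.2).2)
          else acc) acc).2) := by
  intro ks
  induction ks with
  | nil => intro acc hacc; exact ⟨rfl, hacc⟩
  | cons k ks ihks =>
    intro acc hacc
    simp only [List.foldl_cons]
    by_cases hg : PySem.List.pyGetD (PySem.List.pyGetD wt (n : Int) []) k 0 ≤ w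
    · rw [if_pos hg, if_pos hg]
      obtain ⟨hp1, hp2⟩ := ih (w - PySem.List.pyGetD (PySem.List.pyGetD wt (n : Int) []) k 0) acc.2 hacc
      obtain ⟨e1, e2⟩ := ihks
        ((if (pvSolveB gc wt vl n (w - PySem.List.pyGetD (PySem.List.pyGetD wt (n : Int) []) k 0) acc.2).1
              + PySem.List.pyGetD (PySem.List.pyGetD vl (n : Int) []) k 0 > acc.1 then
            (pvSolveB gc wt vl n (w - PySem.List.pyGetD (PySem.List.pyGetD wt (n : Int) []) k 0) acc.2).1
              + PySem.List.pyGetD (PySem.List.pyGetD vl (n : Int) []) k 0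
          else acc.1,
          (pvSolveB gc wt vl n (w - PySem.List.pyGetD (PySem.List.pyGetD wt (n : Int) []) k 0) acc.2).2)) hp2
      refine ⟨e1.trans ?_, e2⟩
      exact congrArg (fun z => List.foldl _ z ks) (by rw [hp1])
    · rw [if_neg hg, if_neg hg]
      exact ihks acc hacc

theorem pvSolveB_ok (gc : List Int) (wt vl : List (List Int)) :
    ∀ (i : Nat) (w : Int) (m : PySem.Dict (Int × Int) Int), pvGood gc wt vl m →
      (pvSolveB gc wt vl i w m).1 = pvSolveP gc wt vl i w ∧
      pvGood gc wt vl (pvSolveB gc wt vl i w m).2 := by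
  intro i
  induction i with
  | zero => intro w m hm; exact ⟨rfl, hm⟩
  | succ n ih =>
    intro w m hm
    rcases hget : PySem.Dict.get? m ((n : Int) + 1, w) with _ | v
    · -- cache miss
      obtain ⟨h1, h2⟩ := ih w m hm
      have hf := pvSolveB_fold gc wt vl n w ih
        (PySem.List.pyRange 0 (PySem.List.pyGetD gc (n : Int) 0) 1)
        (pvSolveB gc wt vl n w m) h2
      rw [h1] at hf
      have hr1 := hf.1.trans (pvSolveP_succ gc wt vl n w).symm
      simp only [pvSolveB_succ gc wt vl n w m, hget]
      refine ⟨hr1, ?_⟩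
      intro i' w' v' hv'
      rw [PySem.Dict.get?_insert] at hv'
      split_ifs at hv' with hk
      · have hi' : (i' : Int) = (n : Int) + 1 := congrArg Prod.fst hk
        have hw' : w' = w := congrArg Prod.snd hk
        have hii : i' = n + 1 := by omega
        subst hii; subst hw'
        exact (Option.some.inj hv').symm.trans hr1
      · exact hf.2 i' w' v' hv'
    · -- cache hit
      simp only [pvSolveB_succ gc wt vl n w m, hget]
      refine ⟨?_, hm⟩
      have := hm (n + 1) w v (by rw [Nat.cast_add, Nat.cast_one]; exact hget)
      exact this

theorem alt_eq (gc : List Int) (wt vl : List (List Int)) (W : Int) :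
    groupPackMethod1_alt gc wt vl W = pvSolveP gc wt vl gc.length W := by
  have h := pvSolveB_ok gc wt vl gc.length W PySem.Dict.empty
    (by intro i w v hv; rw [PySem.Dict.get?_empty] at hv; cases hv)
  exact h.1

theorem max_eq_ite (a b : Int) : max a b = if b > a then b else a := by
  rw [max_def]; split_ifs <;> omega

def pvRow (gc : List Int) (wt vl : List (List Int)) (W : Int) (i : Nat) : List Int :=
  (PySem.List.pyRange 0 (W + 1) 1).map (fun w => pvSolveP gc wt vl i w)

def pvTbl (gc : List Int) (wt vl : List (List Int)) (W : Int) (t : Nat) : List (List Int) :=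
  (List.range (gc.length + 1)).map (fun j => if j ≤ t then pvRow gc wt vl W j else pvRow gc wt vl W 0)

theorem row_getD (gc : List Int) (wt vl : List (List Int)) (W : Int) (i : Nat) (w : Int)
    (h0 : 0 ≤ w) (h1 : w ≤ W) :
    PySem.List.pyGetD (pvRow gc wt vl W i) w 0 = pvSolveP gc wt vl i w := by
  unfold pvRow
  exact PySem.List.pyGetD_map_pyRange_of_nonneg _ _ _ _ h0 (by omega)

theorem tbl_getD (gc : List Int) (wt vl : List (List Int)) (W : Int) (t j : Nat)
    (hj : j ≤ gc.length) :
    PySem.List.pyGetD (pvTbl gc wt vl W t) (j : Int) [] =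
      if j ≤ t then pvRow gc wt vl W j else pvRow gc wt vl W 0 := by
  unfold pvTbl
  rw [PySem.List.pyGetD_natCast, PySem.List.getD_map_range _ _ _ _ (by omega)]

theorem dp0_eq (gc : List Int) (wt vl : List (List Int)) (W : Int) :
    (PySem.List.pyRange 0 ((gc.length : Int) + 1) 1).map
        (fun _ => (PySem.List.pyRange 0 (W + 1) 1).map (fun _ => (0 : Int)))
      = pvTbl gc wt vl W 0 := by
  have hc : ((gc.length : Int) + 1) = ((gc.length + 1 : Nat) : Int) := by push_cast; ring
  rw [hc, PySem.List.pyRange_zero_natCast, List.map_map]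
  unfold pvTbl
  refine List.map_congr_left ?_
  intro j hj
  have hrow : (PySem.List.pyRange 0 (W + 1) 1).map (fun _ => (0 : Int)) = pvRow gc wt vl W 0 := rfl
  rcases Nat.eq_zero_or_pos j with rfl | hpos
  · simpa using hrow
  · simp only [Function.comp_apply]
    rw [if_neg (by omega)]
    exact hrow

theorem tbl_set (gc : List Int) (wt vl : List (List Int)) (W : Int) (t : Nat)
    (_ht : t < gc.length) :
    (pvTbl gc wt vl W t).set (t + 1) (pvRow gc wt vl W (t + 1)) = pvTbl gc wt vl W (t + 1) := by
  unfold pvTbl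
  apply List.ext_getElem
  · simp
  intro j h1 h2
  simp only [List.length_set, List.length_map, List.length_range] at h1 h2
  simp only [List.getElem_set, List.getElem_map, List.getElem_range]
  by_cases e : t + 1 = j
  · rw [if_pos e, if_pos (by omega)]
    subst e; rfl
  · rw [if_neg e]
    by_cases e2 : j ≤ t
    · rw [if_pos e2, if_pos (by omega)]
    · rw [if_neg e2, if_neg (by omega)]

theorem stepA_eq (gc : List Int) (wt vl : List (List Int)) (W : Int) (_hW : 0 ≤ W)
    (hpre : ∀ i < gc.length,
      (gc.getD i 0 ≤ ((wt.getD i []).length : Int)) ∧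
      ∀ k < (gc.getD i 0).toNat,
        0 ≤ (wt.getD i []).getD k 0 ∧
        ((wt.getD i []).getD k 0 ≤ W → k < (vl.getD i []).length))
    (t : Nat) (ht : t < gc.length) :
    PySem.List.pySetD (pvTbl gc wt vl W t) ((t : Int) + 1)
      ((PySem.List.pyRange 0 (W + 1) 1).foldl
        (fun row w =>
          row ++ [(PySem.List.pyRange 0 (PySem.List.pyGetD gc ((t : Int) + 1 - 1) 0) 1).foldl
            (fun cur k =>
              if w ≥ PySem.List.pyGetD (PySem.List.pyGetD wt ((t : Int) + 1 - 1) []) k 0 then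
                max cur
                  (PySem.List.pyGetD (PySem.List.pyGetD (pvTbl gc wt vl W t) ((t : Int) + 1 - 1) [])
                      (w - PySem.List.pyGetD (PySem.List.pyGetD wt ((t : Int) + 1 - 1) []) k 0) 0
                    + PySem.List.pyGetD (PySem.List.pyGetD vl ((t : Int) + 1 - 1) []) k 0)
              else cur)
            (PySem.List.pyGetD (PySem.List.pyGetD (pvTbl gc wt vl W t) ((t : Int) + 1 - 1) []) w 0)])
        [])
      = pvTbl gc wt vl W (t + 1) := by
  have hi : (t : Int) + 1 - 1 = (t : Int) := by ring
  rw [hi]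
  have htbl : PySem.List.pyGetD (pvTbl gc wt vl W t) ((t : Nat) : Int) [] = pvRow gc wt vl W t := by
    rw [tbl_getD gc wt vl W t t (le_of_lt ht), if_pos (le_refl t)]
  rw [htbl]
  rw [PySem.List.foldl_append_singleton_eq_map, List.nil_append]
  have hcnt : PySem.List.pyGetD gc ((t : Nat) : Int) 0 = gc.getD t 0 := PySem.List.pyGetD_natCast _ _ _
  have hmain : (PySem.List.pyRange 0 (W + 1) 1).map
      (fun w => (PySem.List.pyRange 0 (PySem.List.pyGetD gc ((t : Nat) : Int) 0) 1).foldl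
        (fun cur k =>
          if w ≥ PySem.List.pyGetD (PySem.List.pyGetD wt ((t : Nat) : Int) []) k 0 then
            max cur
              (PySem.List.pyGetD (pvRow gc wt vl W t)
                  (w - PySem.List.pyGetD (PySem.List.pyGetD wt ((t : Nat) : Int) []) k 0) 0
                + PySem.List.pyGetD (PySem.List.pyGetD vl ((t : Nat) : Int) []) k 0)
          else cur)
        (PySem.List.pyGetD (pvRow gc wt vl W t) w 0))
      = pvRow gc wt vl W (t + 1) := by
    rw [show pvRow gc wt vl W (t + 1)
        = (PySem.List.pyRange 0 (W + 1) 1).map (fun w => pvSolveP gc wt vl (t + 1) w) from rfl]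
    refine List.map_congr_left ?_
    intro w hw
    obtain ⟨hw0, hw1⟩ := PySem.List.mem_pyRange_one.mp hw
    rw [pvSolveP_succ]
    rw [row_getD gc wt vl W t w hw0 (by omega)]
    apply PySem.List.foldl_congr_mem
    intro cur k hk
    obtain ⟨hk0, hk1⟩ := PySem.List.mem_pyRange_one.mp hk
    have hkt : k = (k.toNat : Int) := (Int.toNat_of_nonneg hk0).symm
    have hcnt' : k.toNat < (gc.getD t 0).toNat := by rw [hcnt] at hk1; omega
    obtain ⟨hwnn, hval⟩ := (hpre t ht).2 k.toNat hcnt'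
    have hwtk : PySem.List.pyGetD (PySem.List.pyGetD wt ((t : Nat) : Int) []) k 0
        = (wt.getD t []).getD k.toNat 0 := by
      rw [PySem.List.pyGetD_natCast, hkt, PySem.List.pyGetD_natCast]
      congr 1
    simp only [hwtk]
    by_cases hg : (wt.getD t []).getD k.toNat 0 ≤ w
    · rw [if_pos hg, if_pos hg]
      rw [row_getD gc wt vl W t (w - (wt.getD t []).getD k.toNat 0) (by omega) (by omega)]
      rw [max_eq_ite]
    · rw [if_neg hg, if_neg hg]
  rw [hmain]
  have hc : ((t : Int) + 1) = (((t + 1 : Nat)) : Int) := by push_cast; ring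
  rw [hc, PySem.List.pySetD_natCast]
  exact tbl_set gc wt vl W t ht

theorem portA_eq (gc : List Int) (wt vl : List (List Int)) (W : Int) (hW : 0 ≤ W)
    (hpre : ∀ i < gc.length,
      (gc.getD i 0 ≤ ((wt.getD i []).length : Int)) ∧
      ∀ k < (gc.getD i 0).toNat,
        0 ≤ (wt.getD i []).getD k 0 ∧
        ((wt.getD i []).getD k 0 ≤ W → k < (vl.getD i []).length)) :
    groupPackMethod1 gc wt vl W = pvSolveP gc wt vl gc.length W := by
  have hfold : ∀ t : Nat, t ≤ gc.length →
      (PySem.List.pyRange 1 ((t : Int) + 1) 1).foldl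
        (fun dp i =>
          let row :=
            (PySem.List.pyRange 0 (W + 1) 1).foldl
              (fun row w =>
                let cell :=
                  (PySem.List.pyRange 0 (PySem.List.pyGetD gc (i - 1) 0) 1).foldl
                    (fun cur k =>
                      if w ≥ PySem.List.pyGetD (PySem.List.pyGetD wt (i - 1) []) k 0 then
                        max cur
                          (PySem.List.pyGetD (PySem.List.pyGetD dp (i - 1) [])
                              (w - PySem.List.pyGetD (PySem.List.pyGetD wt (i - 1) []) k 0) 0
                            + PySem.List.pyGetD (PySem.List.pyGetD vl (i - 1) []) k 0)
                      else cur)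
                    (PySem.List.pyGetD (PySem.List.pyGetD dp (i - 1) []) w 0)
                row ++ [cell])
              []
          PySem.List.pySetD dp i row)
        ((PySem.List.pyRange 0 ((gc.length : Int) + 1) 1).map
          (fun _ => (PySem.List.pyRange 0 (W + 1) 1).map (fun _ => (0 : Int))))
      = pvTbl gc wt vl W t := by
    intro t
    induction t with
    | zero =>
      intro _
      rw [show ((0 : Nat) : Int) + 1 = 1 from rfl,
        PySem.List.pyRange_one_eq_nil (le_refl (1 : Int)), List.foldl_nil]
      exact dp0_eq gc wt vl W
    | succ t iht =>
      intro h
      have hc : (((t + 1 : Nat)) : Int) + 1 = ((t : Int) + 1) + 1 := by push_cast; ring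
      rw [hc, PySem.List.pyRange_one_succ_right (a := 1) (b := (t : Int) + 1) (by omega),
        List.foldl_append, iht (by omega), List.foldl_cons, List.foldl_nil]
      exact stepA_eq gc wt vl W hW hpre t (by omega)
  show PySem.List.pyGetD
      (PySem.List.pyGetD
        ((PySem.List.pyRange 1 ((gc.length : Int) + 1) 1).foldl _ _)
        ((gc.length : Int)) []) W 0 = _
  rw [hfold gc.length (le_refl _)]
  rw [tbl_getD gc wt vl W gc.length gc.length (le_refl _), if_pos (le_refl _)]
  exact row_getD gc wt vl W gc.length W hW (le_refl W)

-- ===== VERDICT (by name: the statement is the Claim_ definition above) =====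
theorem groupPackMethod1_spec : Claim_equal_groupPackMethod1 := by
  intro gc wt vl W _ hpre
  unfold Spec_groupPackMethod1
  obtain ⟨hW, hp⟩ := hpre
  rw [portA_eq gc wt vl W hW hp, alt_eq]
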